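-- pv_equiv track=rewrite | github.com/juheon/LRCAGE | script/filter_spurious.v4.py | FindAnchor
-- ===== SOURCE A (Python) =====
-- def FindAnchor( a_strAlignPerBase, a_strAlignPerBase_filt):
-- 	#the first and the last index that are not part of trimmed region
-- 	nLen_before=len(a_strAlignPerBase)
-- 	nLen_after=len(a_strAlignPerBase_filt)
-- 	arrIndexMatch=[]
-- 	for i in range( 0, min(nLen_before, nLen_after) ):
-- 		if a_strAlignPerBase[i]!=a_strAlignPerBase_filt[i]:
-- 			continue;
-- 		if a_strAlignPerBase_filt[i]!=" ":
-- 			arrIndexMatch.append( i );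
-- 	if len(arrIndexMatch)==0:
-- 		return None;
-- 	else:
-- 		return (min(arrIndexMatch), max(arrIndexMatch))
-- ===== SOURCE B (Python) =====
-- def FindAnchor(a_strAlignPerBase, a_strAlignPerBase_filt):
--     n = min(len(a_strAlignPerBase), len(a_strAlignPerBase_filt))
--     first = None
--     for i in range(n):
--         if a_strAlignPerBase[i] == a_strAlignPerBase_filt[i] and a_strAlignPerBase_filt[i] != " ":
--             first = i
--             break
--     if first is None:
--         return None
--     last = first
--     for i in range(n - 1, first, -1):
--         if a_strAlignPerBase[i] == a_strAlignPerBase_filt[i] and a_strAlignPerBase_filt[i] != " ":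
--             last = i
--             break
--     return (first, last)
-- ===== Notes on version B (the rewrite author's own statement) =====
-- stated objective: faster
-- what changed: Instead of building the list of all matching indices and taking min/max, B finds the endpoints directly: a forward scan that stops at the first matching index and a backward scan from the end that stops at the last one, so no intermediate list is built and each scan breaks early.
import Mathlib
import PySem

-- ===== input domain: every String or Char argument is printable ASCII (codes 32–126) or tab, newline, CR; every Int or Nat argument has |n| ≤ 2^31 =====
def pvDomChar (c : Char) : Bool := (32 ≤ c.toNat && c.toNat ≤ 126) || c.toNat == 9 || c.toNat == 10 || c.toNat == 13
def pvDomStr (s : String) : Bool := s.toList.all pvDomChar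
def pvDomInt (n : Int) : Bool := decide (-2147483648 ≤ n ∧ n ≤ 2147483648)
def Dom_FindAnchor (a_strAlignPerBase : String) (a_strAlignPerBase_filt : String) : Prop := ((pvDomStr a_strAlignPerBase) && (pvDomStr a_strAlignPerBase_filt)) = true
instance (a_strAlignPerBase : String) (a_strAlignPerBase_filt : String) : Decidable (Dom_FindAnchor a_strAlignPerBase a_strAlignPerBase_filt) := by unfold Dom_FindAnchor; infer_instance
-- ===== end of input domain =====

-- B locates the two endpoints by a forward scan (first match) and a backward scan (last match)
-- instead of collecting every matching index into a list and taking min/max; same cost, no list built.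

-- ===== PORT A =====
def FindAnchor (a_strAlignPerBase : String) (a_strAlignPerBase_filt : String) : Option (Int × Int) :=
  let nLen_before : Int := (a_strAlignPerBase.toList.length : Int)
  let nLen_after : Int := (a_strAlignPerBase_filt.toList.length : Int)
  let arrIndexMatch : List Int :=
    (PySem.List.pyRange 0 (min nLen_before nLen_after) 1).foldl
      (fun acc i =>
        if PySem.List.pyGet? a_strAlignPerBase.toList i != PySem.List.pyGet? a_strAlignPerBase_filt.toList i then acc
        else if PySem.List.pyGet? a_strAlignPerBase_filt.toList i != some ' ' then acc ++ [i]
        else acc) []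
  if arrIndexMatch.length = 0 then none
  else some ((PySem.List.min? arrIndexMatch (fun x => x)).getD 0,
             (PySem.List.max? arrIndexMatch (fun x => x)).getD 0)

-- ===== PORT B =====
-- the match test both scans of B use: chars equal and the filtered char is not a space
def pvCond (xs ys : List Char) (i : Int) : Bool :=
  (PySem.List.pyGet? xs i == PySem.List.pyGet? ys i) && (PySem.List.pyGet? ys i != some ' ')

def FindAnchor_alt (a_strAlignPerBase : String) (a_strAlignPerBase_filt : String) : Option (Int × Int) :=
  let n : Int := min (a_strAlignPerBase.toList.length : Int) (a_strAlignPerBase_filt.toList.length : Int)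
  match (PySem.List.pyRange 0 n 1).find? (pvCond a_strAlignPerBase.toList a_strAlignPerBase_filt.toList) with
  | none => none
  | some first =>
      let last := ((PySem.List.pyRange (n - 1) first (-1)).find?
          (pvCond a_strAlignPerBase.toList a_strAlignPerBase_filt.toList)).getD first
      some (first, last)

-- ===== PRECONDITION & SPEC =====
def Spec_FindAnchor (a_strAlignPerBase : String) (a_strAlignPerBase_filt : String) (out : Option (Int × Int)) : Prop := out = FindAnchor_alt a_strAlignPerBase a_strAlignPerBase_filt
instance (a_strAlignPerBase : String) (a_strAlignPerBase_filt : String) (out : Option (Int × Int)) : Decidable (Spec_FindAnchor a_strAlignPerBase a_strAlignPerBase_filt out) := by unfold Spec_FindAnchor; infer_instance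

-- ===== CLAIM (what is proved, stated in full; the proofs are below) =====
def Claim_equal_FindAnchor : Prop := ∀ (a_strAlignPerBase : String) (a_strAlignPerBase_filt : String), Dom_FindAnchor a_strAlignPerBase a_strAlignPerBase_filt → Spec_FindAnchor a_strAlignPerBase a_strAlignPerBase_filt (FindAnchor a_strAlignPerBase a_strAlignPerBase_filt)

-- ===== LEMMAS AND PROOFS =====

-- A's loop builds exactly the filter of the range by pvCond
lemma foldA_eq_filter (xs ys : List Char) (l : List Int) (acc : List Int) :
    l.foldl (fun acc i =>
        if PySem.List.pyGet? xs i != PySem.List.pyGet? ys i then acc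
        else if PySem.List.pyGet? ys i != some ' ' then acc ++ [i]
        else acc) acc = acc ++ l.filter (pvCond xs ys) := by
  induction l generalizing acc with
  | nil => simp
  | cons h t ih =>
    simp only [List.foldl_cons, List.filter_cons, ih]
    by_cases h1 : PySem.List.pyGet? xs h = PySem.List.pyGet? ys h
    · by_cases h2 : PySem.List.pyGet? ys h = some ' ' <;>
        simp [pvCond, h1, h2]
    · simp [pvCond, h1]

lemma find?_eq_head?_filter {α : Type} (p : α → Bool) (l : List α) :
    l.find? p = (l.filter p).head? := by
  induction l with
  | nil => rfl
  | cons h t ih =>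
    cases hp : p h
    · rw [List.find?_cons_of_neg (by simp [hp]), List.filter_cons_of_neg (by simp [hp]), ih]
    · rw [List.find?_cons_of_pos hp, List.filter_cons_of_pos hp, List.head?_cons]

lemma foldl_min_of_le (t : List Int) (x : Int) (h : ∀ y ∈ t, x ≤ y) :
    t.foldl min x = x := by
  induction t with
  | nil => rfl
  | cons a t ih =>
    simp only [List.foldl_cons]
    rw [min_eq_left (h a (by simp))]
    exact ih (fun y hy => h y (by simp [hy]))

lemma foldl_max_sorted : ∀ (t : List Int) (x : Int), t.Pairwise (· < ·) → (∀ y ∈ t, x ≤ y) →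
    t.foldl max x = (t.getLast?).getD x := by
  intro t
  induction t with
  | nil => intro x _ _; rfl
  | cons a t ih =>
    intro x hs h
    simp only [List.foldl_cons]
    rw [max_eq_right (h a (by simp))]
    rcases t with _ | ⟨b, t'⟩
    · rfl
    · rw [List.getLast?_cons_cons]
      exact ih a (List.Pairwise.of_cons hs) (fun y hy => le_of_lt ((List.pairwise_cons.mp hs).1 y hy))

-- splitting the filtered range at the first match: the part up to first+1 is exactly [first]
lemma filter_split (p : Int → Bool) (n x : Int) (t : List Int)
    (hM : (PySem.List.pyRange 0 n 1).filter p = x :: t) :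
    (PySem.List.pyRange (x + 1) n 1).filter p = t := by
  have hxmem : x ∈ (PySem.List.pyRange 0 n 1).filter p := by rw [hM]; simp
  have hxr : x ∈ PySem.List.pyRange 0 n 1 := List.mem_of_mem_filter hxmem
  have hpx : p x := List.of_mem_filter hxmem
  have hxb := (PySem.List.mem_pyRange_one).mp hxr
  have hsplit := PySem.List.pyRange_one_append 0 (x + 1) n (by omega) (by omega)
  rw [hsplit, List.filter_append] at hM
  set F1 := (PySem.List.pyRange 0 (x + 1) 1).filter p with hF1
  have hxF1 : x ∈ F1 := by
    rw [hF1]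
    exact List.mem_filter.mpr ⟨(PySem.List.mem_pyRange_one).mpr (by omega), hpx⟩
  -- F1 is nonempty, so its head is the head of the append, namely x
  rcases hF : F1 with _ | ⟨y, F1'⟩
  · rw [hF] at hxF1; simp at hxF1
  · rw [hF] at hM
    have hy : x = y := by
      have := congrArg List.head? hM
      simp at this
      exact this.symm
    subst hy
    -- every element of F1 is < x+1, and F1 is pairwise <, so F1' = []
    have hpw : F1.Pairwise (· < ·) :=
      List.Pairwise.filter p (PySem.List.pairwise_lt_pyRange_one 0 (x + 1))
    rw [hF] at hpw
    have hgt : ∀ z ∈ F1', x < z := (List.pairwise_cons.mp hpw).1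
    have hlt : ∀ z ∈ F1', z < x + 1 := by
      intro z hz
      have : z ∈ F1 := by rw [hF]; simp [hz]
      have := (PySem.List.mem_pyRange_one).mp (List.mem_of_mem_filter (hF1 ▸ this))
      omega
    rcases F1' with _ | ⟨z, _⟩
    · simpa using hM
    · have h1 := hgt z (by simp)
      have h2 := hlt z (by simp)
      omega

lemma min_id_sorted (x : Int) (t : List Int) (hs : (x :: t).Pairwise (· < ·)) :
    PySem.List.min? (x :: t) (fun y => y) = some x := by
  rw [PySem.List.min?_id_cons]
  exact congrArg some (foldl_min_of_le t x (fun y hy => le_of_lt ((List.pairwise_cons.mp hs).1 y hy)))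

lemma max_id_sorted (x : Int) (t : List Int) (hs : (x :: t).Pairwise (· < ·)) :
    PySem.List.max? (x :: t) (fun y => y) = some ((t.getLast?).getD x) := by
  rw [PySem.List.max?_id_cons]
  exact congrArg some (foldl_max_sorted t x (List.Pairwise.of_cons hs)
    (fun y hy => le_of_lt ((List.pairwise_cons.mp hs).1 y hy)))

-- ===== VERDICT (by name: the statement is the Claim_ definition above) =====
theorem FindAnchor_spec : Claim_equal_FindAnchor := by
  intro a b _
  unfold Spec_FindAnchor FindAnchor FindAnchor_alt
  simp only [foldA_eq_filter, List.nil_append]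
  set xs := a.toList
  set ys := b.toList
  set n : Int := min (xs.length : Int) (ys.length : Int) with hn
  set p := pvCond xs ys with hp
  set M := (PySem.List.pyRange 0 n 1).filter p with hMdef
  have hpw : M.Pairwise (· < ·) :=
    List.Pairwise.filter p (PySem.List.pairwise_lt_pyRange_one 0 n)
  rw [find?_eq_head?_filter]
  rcases hM : M with _ | ⟨x, t⟩
  · simp [← hMdef, hM]
  · rw [← hMdef, hM]
    simp only [List.head?_cons, List.length_cons]
    rw [hM] at hpw
    rw [min_id_sorted x t hpw, max_id_sorted x t hpw]
    have hxmem : x ∈ M := by rw [hM]; simp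
    have hxb := (PySem.List.mem_pyRange_one).mp (List.mem_of_mem_filter (hMdef ▸ hxmem))
    have hrev : PySem.List.pyRange (n - 1) x (-1) = (PySem.List.pyRange (x + 1) n 1).reverse := by
      have h0 := PySem.List.pyRange_neg_one_eq_reverse (n - 1) x
      rw [h0]
      norm_num
    rw [hrev, find?_eq_head?_filter, List.filter_reverse, List.head?_reverse,
        filter_split p n x t (hMdef ▸ hM)]
    simp
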